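-- pv_equiv track=rewrite | github.com/ourolang/ouro | V1/bootstrap/src/loader.py | _dedupe_shared_helpers
-- ===== SOURCE A (Python) =====
-- from typing import Optional
--
-- _SHARED_HELPER_SYMBOLS: tuple[str, ...] = (
--     "$_slice_eq_u8",
--     "$_slice_hash_u8",
-- )
--
-- def _dedupe_shared_helpers(ir: str) -> str:
--     """Keep at most one definition of each bare-named helper function
--     in *ir*.  A definition starts at `function <ret>? $name(...)` and
--     runs until the matching closing `}` at column 0."""
--     lines = ir.split("\n")
--     out: list[str] = []
--     i = 0
--     seen: set[str] = set()
--     while i < len(lines):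
--         line = lines[i]
--         helper_hit: Optional[str] = None
--         for sym in _SHARED_HELPER_SYMBOLS:
--             if line.startswith("function ") and f"{sym}(" in line:
--                 helper_hit = sym
--                 break
--         if helper_hit is not None and helper_hit in seen:
--             # Skip until the closing `}` at column 0.
--             while i < len(lines) and lines[i] != "}":
--                 i += 1
--             i += 1  # consume the `}` too
--             continue
--         if helper_hit is not None:
--             seen.add(helper_hit)
--         out.append(line)
--         i += 1
--     return "\n".join(out)
-- ===== SOURCE B (Python) =====
-- from typing import Optional
--
-- _SHARED_HELPER_SYMBOLS: tuple[str, ...] = (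
--     "$_slice_eq_u8",
--     "$_slice_hash_u8",
-- )
--
-- def _which(line: str) -> Optional[str]:
--     if line.startswith("function "):
--         for sym in _SHARED_HELPER_SYMBOLS:
--             if sym + "(" in line:
--                 return sym
--     return None
--
-- def _dedupe(lines: list[str], seen: set[str]) -> list[str]:
--     """Splice-based recursion: locate the next duplicate helper header,
--     copy the untouched prefix wholesale, cut the block out via index of
--     the column-0 `}`, and recurse on the remainder."""
--     cut = None
--     for k, line in enumerate(lines):
--         sym = _which(line)
--         if sym is not None:
--             if sym in seen:
--                 cut = k
--                 break
--             seen.add(sym)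
--     if cut is None:
--         return lines
--     tail = lines[cut:]
--     if "}" not in tail:
--         return lines[:cut]
--     return lines[:cut] + _dedupe(tail[tail.index("}") + 1:], seen)
--
-- def _dedupe_shared_helpers(ir: str) -> str:
--     return "\n".join(_dedupe(ir.split("\n"), set()))
-- ===== Notes on version B (the rewrite author's own statement) =====
-- stated objective: alternative
-- what changed: Replaces A's line-at-a-time index state machine (outer while over i with an inner skip-while) by a splice-based recursion: scan for the position of the next duplicate helper header, emit the untouched prefix wholesale via slicing, cut the block out with list.index of the closing brace, and recurse on the remainder.
import Mathlib
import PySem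

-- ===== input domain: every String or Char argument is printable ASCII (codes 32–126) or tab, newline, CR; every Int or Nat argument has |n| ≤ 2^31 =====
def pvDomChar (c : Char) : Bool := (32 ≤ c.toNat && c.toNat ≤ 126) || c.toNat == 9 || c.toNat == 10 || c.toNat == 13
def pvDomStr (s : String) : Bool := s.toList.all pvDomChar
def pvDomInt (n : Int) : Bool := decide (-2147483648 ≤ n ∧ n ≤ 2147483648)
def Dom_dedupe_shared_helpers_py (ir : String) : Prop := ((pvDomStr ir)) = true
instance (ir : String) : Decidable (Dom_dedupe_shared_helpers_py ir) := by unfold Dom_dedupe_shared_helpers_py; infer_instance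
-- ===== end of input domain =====

-- B replaces A's line-at-a-time index state machine by a splice-based recursion: find the next
-- duplicate helper header, copy the prefix wholesale, cut the block out via index of `}`, recurse
-- (objective: alternative).

-- ===== PORT A =====
def pvSymbols : List (List Char) := ["$_slice_eq_u8".toList, "$_slice_hash_u8".toList]

-- the `for sym in _SHARED_HELPER_SYMBOLS: … break` search in A's loop body
def pvHelperHitA (line : List Char) : Option (List Char) :=
  pvSymbols.find? (fun sym =>
    PySem.Chars.startswith line "function ".toList && PySem.Chars.isIn (sym ++ ['(']) line)

-- A's inner `while i < len(lines) and lines[i] != "}": i += 1; i += 1`: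
-- drop lines through the first "}" inclusive
def pvSkipA : List (List Char) → List (List Char)
  | [] => []
  | l :: rest => if l = ['}'] then rest else pvSkipA rest

theorem pvSkipA_len_le : ∀ (xs : List (List Char)), (pvSkipA xs).length ≤ xs.length
  | [] => Nat.le_refl _
  | _ :: rest => by
      unfold pvSkipA
      split
      · exact Nat.le_succ _
      · exact Nat.le_trans (pvSkipA_len_le rest) (Nat.le_succ _)

-- A's outer while loop over index i, as recursion on the remaining lines
def pvLoopA : List (List Char) → PySem.Set (List Char) → List (List Char)
  | [], _ => []
  | line :: rest, seen =>
    match pvHelperHitA line with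
    | some sym =>
      if PySem.Set.contains seen sym then
        pvLoopA (pvSkipA (line :: rest)) seen
      else
        line :: pvLoopA rest (PySem.Set.add seen sym)
    | none => line :: pvLoopA rest seen
  termination_by lines _ => lines.length
  decreasing_by
    · exact Nat.lt_succ_of_le (by unfold pvSkipA; split <;>
        first | exact Nat.le_refl _ | exact pvSkipA_len_le rest)
    · simp
    · simp

def dedupe_shared_helpers_py (ir : String) : String :=
  String.ofList (PySem.Chars.join ['\n']
    (pvLoopA (PySem.Chars.splitOn ir.toList ['\n']) PySem.Set.empty))

-- ===== PORT B =====
-- B's `_which`: startswith checked once, then the symbol scan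
def pvWhichB (line : List Char) : Option (List Char) :=
  if PySem.Chars.startswith line "function ".toList then
    pvSymbols.find? (fun sym => PySem.Chars.isIn (sym ++ ['(']) line)
  else none

-- B's `for k, line in enumerate(lines)` search for `cut`: returns the position of the first
-- duplicate header (if any) together with the `seen` set as mutated by the scan up to there
def pvFindCutB : List (List Char) → PySem.Set (List Char) → Option Nat × PySem.Set (List Char)
  | [], seen => (none, seen)
  | l :: rest, seen =>
    match pvWhichB l with
    | none =>
        match pvFindCutB rest seen with
        | (none, s) => (none, s)
        | (some k, s) => (some (k + 1), s)
    | some sym =>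
        if PySem.Set.contains seen sym then (some 0, seen)
        else
          match pvFindCutB rest (PySem.Set.add seen sym) with
          | (none, s) => (none, s)
          | (some k, s) => (some (k + 1), s)

-- B's `_dedupe`: prefix copied wholesale (`lines[:cut]`), block cut with `tail.index("}")`
def pvDedupeB (lines : List (List Char)) (seen : PySem.Set (List Char)) : List (List Char) :=
  match pvFindCutB lines seen with
  | (none, _) => lines
  | (some k, seen') =>
    match hj : PySem.List.index? (lines.drop k) ['}'] with
    | none => lines.take k
    | some j => lines.take k ++ pvDedupeB ((lines.drop k).drop (j + 1)) seen'
  termination_by lines.length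
  decreasing_by
    have h1 : (lines.drop k).length ≤ lines.length := by simp
    have h2 : ['}'] ∈ lines.drop k := (PySem.List.index?_isSome_iff _ _).mp (by rw [hj]; rfl)
    have h3 : 0 < (lines.drop k).length := List.length_pos_of_mem h2
    simp only [List.length_drop]
    omega

def dedupe_shared_helpers_py_alt (ir : String) : String :=
  String.ofList (PySem.Chars.join ['\n']
    (pvDedupeB (PySem.Chars.splitOn ir.toList ['\n']) PySem.Set.empty))

-- ===== PRECONDITION & SPEC =====
def Spec_dedupe_shared_helpers_py (ir : String) (out : String) : Prop := out = dedupe_shared_helpers_py_alt ir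
instance (ir : String) (out : String) : Decidable (Spec_dedupe_shared_helpers_py ir out) := by unfold Spec_dedupe_shared_helpers_py; infer_instance

-- ===== CLAIM (what is proved, stated in full; the proofs are below) =====
def Claim_equal_dedupe_shared_helpers_py : Prop := ∀ (ir : String), Dom_dedupe_shared_helpers_py ir → Spec_dedupe_shared_helpers_py ir (dedupe_shared_helpers_py ir)

-- ===== LEMMAS AND PROOFS =====

theorem pvWhich_eq (line : List Char) : pvWhichB line = pvHelperHitA line := by
  cases h : PySem.Chars.startswith line ['f', 'u', 'n', 'c', 't', 'i', 'o', 'n', ' '] <;>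
    simp [pvWhichB, pvHelperHitA, pvSymbols, List.find?, h]

-- A's skip-to-`}` loop equals B's index-and-slice
theorem pvSkipA_eq_index : ∀ (xs : List (List Char)),
    pvSkipA xs = match PySem.List.index? xs ['}'] with
                 | none => []
                 | some j => xs.drop (j + 1)
  | [] => by
      rw [show PySem.List.index? ([] : List (List Char)) ['}'] = none from
        (PySem.List.index?_eq_none_iff _ _).mpr (by simp)]
      simp [pvSkipA]
  | l :: rest => by
      by_cases hl : l = ['}']
      · subst hl
        rw [PySem.List.index?_cons_self]
        simp [pvSkipA]
      · rw [PySem.List.index?_cons_of_ne rest hl, pvSkipA, if_neg hl,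
            pvSkipA_eq_index rest]
        cases PySem.List.index? rest ['}'] <;> simp

-- A's loop, re-expressed through B's cut search: no duplicate ⇒ identity;
-- duplicate at k ⇒ keep the prefix and resume after the skip
theorem pvLoopA_cut : ∀ (lines : List (List Char)) (seen : PySem.Set (List Char)),
    pvLoopA lines seen =
      match pvFindCutB lines seen with
      | (none, _) => lines
      | (some k, s') => lines.take k ++ pvLoopA (pvSkipA (lines.drop k)) s'
  | [], seen => by simp [pvLoopA, pvFindCutB]
  | line :: rest, seen => by
      rw [pvLoopA, pvFindCutB, pvWhich_eq]
      cases hh : pvHelperHitA line with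
      | none =>
        rw [pvLoopA_cut rest seen]
        cases hc : pvFindCutB rest seen with
        | mk k? s =>
          cases k? <;> simp
      | some sym =>
        by_cases hs : PySem.Set.contains seen sym = true
        · simp only [hs, if_pos]
          simp
        · simp only [hs]
          rw [pvLoopA_cut rest (PySem.Set.add seen sym)]
          cases hc : pvFindCutB rest (PySem.Set.add seen sym) with
          | mk k? s =>
            cases k? <;> simp

-- main equivalence of the two loop cores
theorem pvMain : ∀ (n : Nat) (lines : List (List Char)), lines.length ≤ n →
    ∀ (seen : PySem.Set (List Char)), pvLoopA lines seen = pvDedupeB lines seen := by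
  intro n
  induction n with
  | zero =>
    intro lines h seen
    have : lines = [] := List.eq_nil_of_length_eq_zero (Nat.le_zero.mp h)
    subst this
    simp [pvLoopA, pvDedupeB, pvFindCutB]
  | succ n ih =>
    intro lines h seen
    rw [pvLoopA_cut, pvDedupeB]
    cases hc : pvFindCutB lines seen with
    | mk k? s' =>
      cases k? with
      | none => simp
      | some k =>
        simp only
        rw [pvSkipA_eq_index (lines.drop k)]
        cases hj : PySem.List.index? (lines.drop k) ['}'] with
        | none => simp [pvLoopA]
        | some j =>
          simp only
          congr 1
          have h2 : ['}'] ∈ lines.drop k := (PySem.List.index?_isSome_iff _ _).mp (by rw [hj]; rfl)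
          have h3 : 0 < (lines.drop k).length := List.length_pos_of_mem h2
          have hlen : ((lines.drop k).drop (j + 1)).length ≤ n := by
            have := List.length_drop (l := lines) (i := k)
            simp only [List.length_drop] at *
            omega
          exact ih _ hlen s'

-- ===== VERDICT (by name: the statement is the Claim_ definition above) =====
theorem dedupe_shared_helpers_py_spec : Claim_equal_dedupe_shared_helpers_py := by
  intro ir _
  unfold Spec_dedupe_shared_helpers_py dedupe_shared_helpers_py dedupe_shared_helpers_py_alt
  rw [pvMain (PySem.Chars.splitOn ir.toList ['\n']).length _ (Nat.le_refl _)]
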